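-- pv_equiv track=rewrite | github.com/BlinkVoid/MemCore | src/memcore/dashboard/analytics.py | _analyze_tag_quadrant_matrix
-- ===== SOURCE A (Python) =====
-- from typing import Dict, Any, List
-- from collections import Counter, defaultdict
--
-- def _analyze_tag_quadrant_matrix(memories: List[Dict]) -> Dict[str, Dict[str, int]]:
--     """Analyze tag-quadrant co-occurrence."""
--     matrix = defaultdict(lambda: defaultdict(int))
--
--     for mem in memories:
--         tags = mem.get("tags", [])
--         quadrants = mem.get("quadrants", ["general"])
--
--         for tag in tags[:5]:  # Top 5 tags per memory
--             for quadrant in quadrants: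
--                 matrix[tag][quadrant] += 1
--
--     # Convert to regular dict
--     return {tag: dict(quadrants) for tag, quadrants in matrix.items()}
-- ===== SOURCE B (Python) =====
-- def _analyze_tag_quadrant_matrix(memories):
--     """Analyze tag-quadrant co-occurrence (flatten -> group by tag -> recount).
--
--     No running counter is maintained: the (tag, quadrant) events are
--     materialised once, and each row is rebuilt by recounting with list.count.
--     """
--     events = [(tag, quadrant)
--               for mem in memories
--               for tag in mem.get("tags", [])[:5]
--               for quadrant in mem.get("quadrants", ["general"])]
--     result = {}
--     for tag in dict.fromkeys(t for t, _ in events):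
--         tag_qs = [q for t, q in events if t == tag]
--         result[tag] = {q: tag_qs.count(q) for q in dict.fromkeys(tag_qs)}
--     return result
-- ===== Notes on version B (the rewrite author's own statement) =====
-- stated objective: alternative
-- what changed: A maintains a nested defaultdict of running counters inside a single scan; B maintains no counter at all: it materialises the flat (tag, quadrant) event list, enumerates the distinct tags in first-occurrence order, and rebuilds each tag's row by filtering that tag's quadrants and recounting each distinct quadrant with list.count.
import Mathlib
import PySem

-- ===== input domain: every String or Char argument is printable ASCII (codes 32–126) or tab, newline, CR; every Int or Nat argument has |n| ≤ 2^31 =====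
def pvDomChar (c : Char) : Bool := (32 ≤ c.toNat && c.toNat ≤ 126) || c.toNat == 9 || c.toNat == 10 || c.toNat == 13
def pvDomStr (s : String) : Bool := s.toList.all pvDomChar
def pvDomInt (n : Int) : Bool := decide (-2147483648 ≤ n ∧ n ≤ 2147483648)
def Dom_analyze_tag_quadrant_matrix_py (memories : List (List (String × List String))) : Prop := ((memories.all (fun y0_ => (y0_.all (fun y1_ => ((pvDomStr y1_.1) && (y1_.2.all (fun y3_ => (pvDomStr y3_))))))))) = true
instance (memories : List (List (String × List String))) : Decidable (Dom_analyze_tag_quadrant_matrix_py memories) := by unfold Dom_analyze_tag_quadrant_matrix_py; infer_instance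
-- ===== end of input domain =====

-- Header: B keeps no running counter: it flattens the memories into the (tag, quadrant)
-- event list, then for each distinct tag rebuilds its row by recounting with list.count;
-- A maintains a nested counting dict inside one scan. Same return value, proved equal.

-- ===== PORT A =====
def analyze_tag_quadrant_matrix_py (memories : List (List (String × List String))) : List (String × List (String × Int)) :=
  let matrix := memories.foldl
    (fun matrix mem =>
      let tags := (PySem.Dict.mk mem).getD "tags" []
      let quadrants := (PySem.Dict.mk mem).getD "quadrants" ["general"]
      (PySem.List.slice tags none (some 5)).foldl
        (fun matrix tag =>
          quadrants.foldl
            (fun matrix quadrant =>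
              matrix.modify tag PySem.Dict.empty (fun inner => inner.modify quadrant 0 (· + 1)))
            matrix)
        matrix)
    PySem.Dict.empty
  matrix.items.map (fun p => (p.1, p.2.items))

-- ===== PORT B =====
-- dict.fromkeys (first-occurrence dedup) is PySem.Set.ofList; the two dict
-- comprehensions/assignments run over distinct keys, so building each dict in
-- order is the List.map of its key stream.
def analyze_tag_quadrant_matrix_py_alt (memories : List (List (String × List String))) : List (String × List (String × Int)) :=
  let events := memories.flatMap
    (fun mem =>
      (PySem.List.slice ((PySem.Dict.mk mem).getD "tags" []) none (some 5)).flatMap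
        (fun tag =>
          ((PySem.Dict.mk mem).getD "quadrants" ["general"]).map (fun quadrant => (tag, quadrant))))
  (PySem.Set.ofList (events.map Prod.fst)).map
    (fun tag =>
      let tagQs := (events.filter (fun e => e.1 == tag)).map Prod.snd
      (tag, (PySem.Set.ofList tagQs).map (fun q => (q, (tagQs.count q : Int)))))

-- ===== PRECONDITION & SPEC =====
def Spec_analyze_tag_quadrant_matrix_py (memories : List (List (String × List String))) (out : List (String × List (String × Int))) : Prop := out = analyze_tag_quadrant_matrix_py_alt memories
instance (memories : List (List (String × List String))) (out : List (String × List (String × Int))) : Decidable (Spec_analyze_tag_quadrant_matrix_py memories out) := by unfold Spec_analyze_tag_quadrant_matrix_py; infer_instance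

-- ===== CLAIM (what is proved, stated in full; the proofs are below) =====
def Claim_equal_analyze_tag_quadrant_matrix_py : Prop := ∀ (memories : List (List (String × List String))), Dom_analyze_tag_quadrant_matrix_py memories → Spec_analyze_tag_quadrant_matrix_py memories (analyze_tag_quadrant_matrix_py memories)

-- ===== LEMMAS AND PROOFS =====

-- The flat event stream both programs process, and A's accumulated matrix.
def pvEv (memories : List (List (String × List String))) : List (String × String) :=
  memories.flatMap
    (fun mem =>
      (PySem.List.slice ((PySem.Dict.mk mem).getD "tags" []) none (some 5)).flatMap
        (fun tag =>
          ((PySem.Dict.mk mem).getD "quadrants" ["general"]).map (fun quadrant => (tag, quadrant))))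

def pvMatA (es : List (String × String)) : PySem.Dict String (PySem.Dict String Int) :=
  es.foldl (fun m e => m.modify e.1 PySem.Dict.empty (fun inner => inner.modify e.2 0 (· + 1))) PySem.Dict.empty

-- A's nested per-memory loops are the fold of the flattened event stream.
theorem pvA_eq (memories : List (List (String × List String))) :
    analyze_tag_quadrant_matrix_py memories
      = (pvMatA (pvEv memories)).items.map (fun p => (p.1, p.2.items)) := by
  simp [analyze_tag_quadrant_matrix_py, pvMatA, pvEv, List.foldl_flatMap, List.foldl_map]

-- getD distributes over a "modify at key e" fold: only matching events act on slot t.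
theorem pv_getD_foldl_modify {κ ν β : Type} [BEq κ] [LawfulBEq κ] [DecidableEq κ]
    (l : List β) (key : β → κ) (d0 : ν) (f : β → ν → ν) (m : PySem.Dict κ ν) (t : κ) :
    (l.foldl (fun m e => m.modify (key e) d0 (f e)) m).getD t d0
      = (l.filter (fun e => key e == t)).foldl (fun v e => f e v) (m.getD t d0) := by
  induction l generalizing m with
  | nil => rfl
  | cons x xs ih =>
    simp only [List.foldl_cons, List.filter_cons]
    rw [ih]
    by_cases h : key x = t
    · simp [h]
    · have h' : t ≠ key x := fun hh => h hh.symm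
      simp [h, h', PySem.Dict.getD_modify]

-- A's slot t is the counter of the quadrants of the events tagged t.
theorem pv_matA_getD (es : List (String × String)) (t : String) :
    (pvMatA es).getD t PySem.Dict.empty
      = PySem.Dict.counter ((es.filter (fun e => e.1 == t)).map Prod.snd) := by
  rw [pvMatA, pv_getD_foldl_modify es Prod.fst PySem.Dict.empty
      (fun e inner => inner.modify e.2 0 (· + 1)) PySem.Dict.empty t,
    PySem.Dict.getD_empty, PySem.Dict.counter_eq_foldl, List.foldl_map]

-- A's outer dict lists the tags in first-occurrence order of the event stream.
theorem pv_matA_keys (es : List (String × String)) :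
    (pvMatA es).keys = PySem.Set.ofList (es.map Prod.fst) := by
  rw [pvMatA, PySem.Dict.keys_foldl_modify_key es Prod.fst PySem.Dict.empty
      (fun _ e inner => inner.modify e.2 0 (· + 1)) PySem.Dict.empty]
  simp [PySem.Set.ofList_eq_foldl, PySem.Set.update, PySem.Dict.keys_empty]

theorem pv_matA_nodup (es : List (String × String)) : (pvMatA es).keys.Nodup := by
  rw [pv_matA_keys]; exact PySem.Set.nodup_ofList _

-- ===== VERDICT (by name: the statement is the Claim_ definition above) =====
theorem analyze_tag_quadrant_matrix_py_spec : Claim_equal_analyze_tag_quadrant_matrix_py := by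
  intro memories _
  unfold Spec_analyze_tag_quadrant_matrix_py
  rw [pvA_eq]
  show _ = (PySem.Set.ofList ((pvEv memories).map Prod.fst)).map _
  rw [PySem.Dict.items_eq_map_keys _ (pv_matA_nodup (pvEv memories)) PySem.Dict.empty,
      pv_matA_keys, List.map_map]
  apply List.map_congr_left
  intro t _
  show (t, ((pvMatA (pvEv memories)).getD t PySem.Dict.empty).items) = (t, _)
  rw [pv_matA_getD, PySem.Dict.items_counter]
  rfl
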